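-- pv_equiv track=rewrite | github.com/chavezdo/unit_testing | task.py | conv_endian
-- ===== SOURCE A (Python) =====
-- def conv_endian(num, endian='big'):
--     """Converts decimal to hexadecimal with respect to fixed endian value."""
--     result = len_str(dec_to_hex(num))
--     if endian == 'big':
--         out = ' '.join(result[i:i + 2] for i in range(0, len(result), 2))
--         return sign_check(num, out)
--     elif endian == 'little':
--         out = ' '.join(reversed([result[i:i + 2] for i in range(0, len(result), 2)]))
--         return sign_check(num, out)
--     else:
--         return None
--
-- def dec_to_hex(number):
--     """Helper function to convert decimal to hexadecimal."""
--     number = abs(number)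
--     table = {0: '0', 1: '1', 2: '2', 3: '3', 4: '4',
--              5: '5', 6: '6', 7: '7', 8: '8', 9: '9',
--              10: 'A', 11: 'B', 12: 'C', 13: 'D',
--              14:  'E', 15: 'F'}
--     hexdec = ''
--     if number == 0:
--         hexdec = table[number]
--     while number > 0:
--         hexdec = table[number % 16] + hexdec
--         number = number // 16
--     return hexdec
--
-- def len_str(strng):
--     """Helper function to find the length of a string."""
--     if len(strng) % 2 == 1:
--         strng = '0' + strng
--         return strng
--     return strng
--
-- def sign_check(number, strng):
--     """Helper function to check and assign sign of number."""
--     if (number) < 0: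
--         strng = '-' + strng
--         return strng
--     return strng
-- ===== SOURCE B (Python) =====
-- HEXD = '0123456789ABCDEF'
--
-- def conv_endian(num, endian='big'):
--     """Converts decimal to hexadecimal with respect to fixed endian value."""
--     if endian != 'big' and endian != 'little':
--         return None
--     n = abs(num)
--     groups = []          # little-endian list of 2-digit byte groups
--     while True:
--         b = n % 256
--         groups.append(HEXD[b // 16] + HEXD[b % 16])
--         n //= 256
--         if n == 0:
--             break
--     if endian == 'big':
--         groups.reverse()
--     s = ' '.join(groups)
--     return '-' + s if num < 0 else s
-- ===== Notes on version B (the rewrite author's own statement) =====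
-- stated objective: alternative
-- what changed: Instead of building a full hex-digit string digit by digit, padding it to even length and re-splitting it into 2-char slices, B extracts whole bytes directly (n % 256, n //= 256) into a little-endian list of 2-digit groups, reverses the list only for 'big', and joins once; the pad/split/reverse-of-slices machinery and three helper functions disappear.
import Mathlib
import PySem

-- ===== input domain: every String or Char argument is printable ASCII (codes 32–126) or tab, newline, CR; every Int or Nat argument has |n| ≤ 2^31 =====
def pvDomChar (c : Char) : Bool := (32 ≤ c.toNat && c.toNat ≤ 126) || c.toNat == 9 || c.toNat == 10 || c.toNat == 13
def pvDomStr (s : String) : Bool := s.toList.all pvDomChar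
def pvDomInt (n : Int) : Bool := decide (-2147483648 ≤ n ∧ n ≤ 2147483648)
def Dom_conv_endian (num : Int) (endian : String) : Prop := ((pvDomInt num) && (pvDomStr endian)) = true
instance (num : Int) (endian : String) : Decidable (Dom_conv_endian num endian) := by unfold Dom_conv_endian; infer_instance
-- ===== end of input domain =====

-- B replaces A's digit-loop + even-pad + slice-into-pairs pipeline by direct byte extraction
-- (n % 256 / n // 256) into a list of 2-digit groups; equivalence of return values is proved below.

-- ===== PORT A =====

-- the literal dict {0:'0', …, 15:'F'} as a lookup (always hit with keys 0..15)
def hexTableA (n : Nat) : List Char :=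
  match n with
  | 0 => ['0'] | 1 => ['1'] | 2 => ['2'] | 3 => ['3'] | 4 => ['4']
  | 5 => ['5'] | 6 => ['6'] | 7 => ['7'] | 8 => ['8'] | 9 => ['9']
  | 10 => ['A'] | 11 => ['B'] | 12 => ['C'] | 13 => ['D'] | 14 => ['E'] | 15 => ['F']
  | _ => []

-- the while-loop of dec_to_hex
def decToHexLoop (number : Nat) (hexdec : List Char) : List Char :=
  if h : number > 0 then
    decToHexLoop (number / 16) (hexTableA (number % 16) ++ hexdec)
  else hexdec
termination_by number
decreasing_by exact Nat.div_lt_self h (by norm_num)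

-- dec_to_hex (strings carried as List Char; wrapped into String only at the very end)
def decToHexA (number : Int) : List Char :=
  let n := number.natAbs
  let hexdec : List Char := if n = 0 then ['0'] else []
  decToHexLoop n hexdec

-- len_str
def lenStrA (strng : List Char) : List Char :=
  if strng.length % 2 = 1 then '0' :: strng else strng

-- sign_check
def signCheckA (number : Int) (strng : List Char) : List Char :=
  if number < 0 then '-' :: strng else strng

def conv_endian (num : Int) (endian : String) : Option String :=
  let result := lenStrA (decToHexA num)
  if endian = "big" then
    let out := PySem.Chars.join [' ']
      ((PySem.List.pyRange 0 (result.length : Int) 2).map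
        (fun i => PySem.List.slice result (some i) (some (i + 2))))
    some (String.mk (signCheckA num out))
  else if endian = "little" then
    let out := PySem.Chars.join [' ']
      (((PySem.List.pyRange 0 (result.length : Int) 2).map
        (fun i => PySem.List.slice result (some i) (some (i + 2)))).reverse)
    some (String.mk (signCheckA num out))
  else none

-- ===== PORT B =====

-- HEXD = '0123456789ABCDEF' (indexing always in range: b // 16 < 16 and b % 16 < 16)
def hexdB : List Char := ['0','1','2','3','4','5','6','7','8','9','A','B','C','D','E','F']

def byteHexB (b : Nat) : List Char :=
  [PySem.List.pyGetD hexdB ((b / 16 : Nat) : Int) ' ', PySem.List.pyGetD hexdB ((b % 16 : Nat) : Int) ' ']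

-- the do-while loop: append group for n % 256, n //= 256, stop when n = 0
def bGroups (n : Nat) : List (List Char) :=
  let g := byteHexB (n % 256)
  let n' := n / 256
  if h : n' = 0 then [g] else g :: bGroups n'
termination_by n
decreasing_by exact Nat.div_lt_self (by omega) (by norm_num)

def conv_endian_alt (num : Int) (endian : String) : Option String :=
  if endian = "big" ∨ endian = "little" then
    let groups := bGroups num.natAbs
    let groups := if endian = "big" then groups.reverse else groups
    let s := PySem.Chars.join [' '] groups
    some (String.mk (if num < 0 then '-' :: s else s))
  else none

-- ===== PRECONDITION & SPEC =====
def Spec_conv_endian (num : Int) (endian : String) (out : Option String) : Prop := out = conv_endian_alt num endian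
instance (num : Int) (endian : String) (out : Option String) : Decidable (Spec_conv_endian num endian out) := by unfold Spec_conv_endian; infer_instance

-- ===== CLAIM (what is proved, stated in full; the proofs are below) =====
def Claim_equal_conv_endian : Prop := ∀ (num : Int) (endian : String), Dom_conv_endian num endian → Spec_conv_endian num endian (conv_endian num endian)

-- ===== LEMMAS AND PROOFS =====

-- hx n: the hex digits of n (empty for 0), the mathematical content of A's while-loop
def hx (n : Nat) : List Char :=
  if h : n = 0 then [] else hx (n / 16) ++ hexTableA (n % 16)
termination_by n
decreasing_by exact Nat.div_lt_self (by omega) (by norm_num)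

theorem decToHexLoop_eq (n : Nat) : ∀ acc, decToHexLoop n acc = hx n ++ acc := by
  induction n using Nat.strong_induction_on with
  | _ n ih =>
    intro acc
    by_cases h : n = 0
    · subst h; rw [decToHexLoop, hx]; simp
    · rw [decToHexLoop, hx]
      simp only [h, if_neg, dif_neg, gt_iff_lt, Nat.pos_of_ne_zero h, if_pos]
      rw [ih (n / 16) (Nat.div_lt_self (Nat.pos_of_ne_zero h) (by norm_num))]
      simp

set_option maxRecDepth 4096 in
theorem byteHexB_eq : ∀ b < 256, byteHexB b = hexTableA (b / 16) ++ hexTableA (b % 16) := by decide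

theorem hexTableA_len : ∀ d < 16, (hexTableA d).length = 1 := by decide

theorem byteHexB_len (b : Nat) : (byteHexB b).length = 2 := rfl

-- lenStr distributes over appending an even-length tail
theorem lenStrA_append_even (s t : List Char) (ht : t.length % 2 = 0) :
    lenStrA (s ++ t) = lenStrA s ++ t := by
  unfold lenStrA
  have : (s ++ t).length % 2 = s.length % 2 := by
    simp [List.length_append]; omega
  rw [this]
  split_ifs <;> simp

-- the padded hex string of n is exactly the concatenation of the big-endian byte groups
theorem pad_eq (n : Nat) : lenStrA (decToHexLoop n (if n = 0 then ['0'] else [])) = ((bGroups n).reverse).flatten := by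
  induction n using Nat.strong_induction_on with
  | _ n ih =>
    rw [decToHexLoop_eq]
    by_cases h0 : n = 0
    · subst h0
      rw [hx, bGroups]
      decide
    · simp only [h0, if_neg, List.append_nil, ite_false]
      by_cases h256 : n / 256 = 0
      · -- n < 256 : one byte group
        rw [bGroups]
        simp only [h256, dite_eq_ite, if_true, List.reverse_singleton, List.flatten_cons,
          List.flatten_nil, List.append_nil]
        have hmod : n % 256 = n := by omega
        rw [hmod, byteHexB_eq n (by omega)]
        by_cases h16 : n / 16 = 0
        · -- one hex digit, gets padded
          rw [hx]; simp only [h0, dite_false]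
          rw [hx]; simp only [h16, dite_true, List.nil_append]
          have hd : n % 16 = n := by omega
          rw [hd]
          unfold lenStrA
          rw [hexTableA_len n (by omega)]
          norm_num
          rfl
        · -- exactly two hex digits, no padding
          rw [hx]; simp only [h0, dite_false]
          rw [hx]; simp only [h16, dite_false]
          rw [hx]
          have h1616 : n / 16 / 16 = 0 := by omega
          simp only [h1616, dite_true, List.nil_append]
          have e1 : n / 16 % 16 = n / 16 := by omega
          rw [e1]
          unfold lenStrA
          rw [List.length_append, hexTableA_len (n / 16) (by omega), hexTableA_len (n % 16) (by omega)]
          simp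
      · -- n ≥ 256 : peel the low byte
        have hsplit : hx n = hx (n / 256) ++ byteHexB (n % 256) := by
          rw [hx]; simp only [h0, dite_false]
          rw [hx]
          have h16 : n / 16 ≠ 0 := by omega
          simp only [h16, dite_false]
          have e1 : n / 16 / 16 = n / 256 := by omega
          have e2 : n / 16 % 16 = n % 256 / 16 := by omega
          have e3 : n % 16 = n % 256 % 16 := by omega
          rw [e1, e2, e3, byteHexB_eq (n % 256) (by omega)]
          simp
        rw [hsplit, lenStrA_append_even _ _ (by rw [byteHexB_len])]
        rw [bGroups]
        simp only [h256, dite_false]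
        have ihm := ih (n / 256) (Nat.div_lt_self (by omega) (by norm_num))
        rw [decToHexLoop_eq] at ihm
        simp only [h256, if_neg, List.append_nil, ite_false] at ihm
        rw [ihm]
        simp

-- all byte groups have length 2
theorem bGroups_len (n : Nat) : ∀ g ∈ bGroups n, g.length = 2 := by
  induction n using Nat.strong_induction_on with
  | _ n ih =>
    intro g hg
    rw [bGroups] at hg
    by_cases h : n / 256 = 0
    · simp only [h, dite_true, List.mem_singleton] at hg; subst hg; exact byteHexB_len _
    · simp only [h, dite_false, List.mem_cons] at hg
      rcases hg with hg | hg
      · subst hg; exact byteHexB_len _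
      · exact ih (n / 256) (Nat.div_lt_self (by omega) (by norm_num)) g hg

-- range(0, 2k, 2) is [0, 2, …, 2(k-1)]
theorem pyRange_two (k : Nat) :
    PySem.List.pyRange 0 (2 * k : Nat) 2 = (List.range k).map (fun (j : Nat) => (2 * (j : Int))) := by
  rw [PySem.List.pyRange_of_pos 0 (2 * k : Nat) (by norm_num)]
  by_cases hk : k = 0
  · subst hk; simp
  · have hlt : (0 : Int) < (2 * k : Nat) := by positivity
    rw [if_pos hlt]
    have hcnt : ((((2 * k : Nat) : Int) - 0 + 2 - 1) / 2).toNat = k := by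
      push_cast; omega
    rw [hcnt]
    apply List.map_congr_left
    intro j _; ring

-- splitting the concatenation of 2-char groups at even offsets recovers the groups
theorem chunks_flatten (gs : List (List Char)) (h : ∀ g ∈ gs, g.length = 2) :
    (PySem.List.pyRange 0 ((gs.flatten).length : Int) 2).map
      (fun i => PySem.List.slice gs.flatten (some i) (some (i + 2))) = gs := by
  have hlen : (gs.flatten).length = 2 * gs.length := by
    induction gs with
    | nil => simp
    | cons g rest ihr =>
      simp only [List.flatten_cons, List.length_append, List.length_cons]
      rw [h g (List.mem_cons_self), ihr (fun g hg => h g (List.mem_cons_of_mem _ hg))]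
      ring
  rw [hlen, pyRange_two, List.map_map]
  clear hlen
  induction gs with
  | nil => simp
  | cons g rest ihr =>
    have hg2 : g.length = 2 := h g (List.mem_cons_self)
    rw [List.length_cons, List.range_succ_eq_map, List.map_cons, List.map_map]
    have hhead : (((fun i => PySem.List.slice (g :: rest).flatten (some i) (some (i + 2))) ∘
        fun (j : Nat) => (2 * (j : Int))) 0) = g := by
      show PySem.List.slice (g ++ rest.flatten) (some (2 * ((0 : Nat) : Int)))
            (some (2 * ((0 : Nat) : Int) + 2)) = g
      have e1 : (2 * ((0 : Nat) : Int)) = ((0 : Nat) : Int) := by norm_num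
      have e2 : (((0 : Nat) : Int) + 2) = ((0 : Nat) : Int) + ((2 : Nat) : Int) := by norm_num
      rw [e1, e2, PySem.List.slice_natCast_add]
      rw [List.drop_zero, List.take_append_of_le_length (by omega)]
      exact List.take_of_length_le (by omega)
    rw [hhead]
    congr 1
    conv_rhs => rw [← ihr (fun g hg => h g (List.mem_cons_of_mem _ hg))]
    apply List.map_congr_left
    intro j _
    show PySem.List.slice (g ++ rest.flatten) (some (2 * ((j + 1 : Nat) : Int)))
          (some (2 * ((j + 1 : Nat) : Int) + 2))
       = PySem.List.slice rest.flatten (some (2 * (j : Int))) (some (2 * (j : Int) + 2))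
    have e1 : (2 * ((j + 1 : Nat) : Int)) = ((2 * j + 2 : Nat) : Int) := by push_cast; ring
    have e2 : (((2 * j + 2 : Nat) : Int) + 2) = ((2 * j + 2 : Nat) : Int) + ((2 : Nat) : Int) := by
      push_cast; ring
    have e3 : (2 * (j : Int)) = ((2 * j : Nat) : Int) := by push_cast; ring
    have e4 : (((2 * j : Nat) : Int) + 2) = ((2 * j : Nat) : Int) + ((2 : Nat) : Int) := by push_cast; ring
    rw [e1, e2, PySem.List.slice_natCast_add, e3, e4, PySem.List.slice_natCast_add]
    congr 1
    rw [show 2 * j + 2 = g.length + 2 * j by omega, List.drop_append,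
      List.drop_eq_nil_of_le (by omega), List.nil_append, Nat.add_sub_cancel_left]

-- the main bridge: A's padded-and-chunked string is B's big-endian group list
theorem chunks_eq (num : Int) :
    (PySem.List.pyRange 0 ((lenStrA (decToHexA num)).length : Int) 2).map
      (fun i => PySem.List.slice (lenStrA (decToHexA num)) (some i) (some (i + 2)))
      = (bGroups num.natAbs).reverse := by
  have hp : lenStrA (decToHexA num) = ((bGroups num.natAbs).reverse).flatten := by
    unfold decToHexA
    exact pad_eq num.natAbs
  rw [hp]
  exact chunks_flatten _ (by intro g hg; exact bGroups_len num.natAbs g (List.mem_reverse.mp hg))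

-- ===== VERDICT (by name: the statement is the Claim_ definition above) =====
theorem conv_endian_spec : Claim_equal_conv_endian := by
  intro num endian _
  unfold Spec_conv_endian conv_endian conv_endian_alt
  by_cases hb : endian = "big"
  · simp only [hb, if_pos, ite_true, eq_self_iff_true, true_or]
    rw [chunks_eq]
    unfold signCheckA
    rfl
  · by_cases hl : endian = "little"
    · simp only [hb, hl, ite_false, ite_true, or_true, if_pos]
      rw [chunks_eq, List.reverse_reverse]
      unfold signCheckA
      rfl
    · simp [hb, hl]
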